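-- pv_equiv track=rewrite | github.com/Hannes-Turppo/LUT-data-structures-and-algorithms | week7/sales.py | sales
-- ===== SOURCE A (Python) =====
-- def quickSort(arr, low, high):
--     if low < high:
--         pi = partition(arr, low, high)
--         quickSort(arr, low, pi - 1)
--         quickSort(arr, pi + 1, high)
--
-- def partition(arr, low, high):
--     pivot = arr[high]
--     i = low - 1
--     for j in range(low, high):
--         if arr[j] < pivot:
--             i += 1
--             arr[i], arr[j] = arr[j], arr[i]
--     arr[i + 1], arr[high] = arr[high], arr[i + 1]
--     return i + 1
--
-- def sales(cars, customers):
--     numberOfSales = 0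
--     quickSort(cars, 0, len(cars) - 1)
--     for budjet in customers:
--         current = None
--         for i in range(len(cars)):
--             if cars[i] > budjet:
--                 break
--             current = i
--         if current != None:
--             cars.pop(current)
--             numberOfSales += 1
--
--     return numberOfSales
-- ===== SOURCE B (Python) =====
-- import bisect
--
-- def sales(cars, customers):
--     # Like A, sorts `cars` in place and removes each sold car from it.
--     cars.sort()
--     numberOfSales = 0
--     for budjet in customers:
--         i = bisect.bisect_right(cars, budjet)
--         if i:
--             cars.pop(i - 1)
--             numberOfSales += 1
--     return numberOfSales
-- ===== Notes on version B (the rewrite author's own statement) =====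
-- stated objective: faster
-- what changed: replaces the hand-written quicksort plus a per-customer linear scan with list.sort and a bisect_right binary search for the priciest affordable car
import Mathlib
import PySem

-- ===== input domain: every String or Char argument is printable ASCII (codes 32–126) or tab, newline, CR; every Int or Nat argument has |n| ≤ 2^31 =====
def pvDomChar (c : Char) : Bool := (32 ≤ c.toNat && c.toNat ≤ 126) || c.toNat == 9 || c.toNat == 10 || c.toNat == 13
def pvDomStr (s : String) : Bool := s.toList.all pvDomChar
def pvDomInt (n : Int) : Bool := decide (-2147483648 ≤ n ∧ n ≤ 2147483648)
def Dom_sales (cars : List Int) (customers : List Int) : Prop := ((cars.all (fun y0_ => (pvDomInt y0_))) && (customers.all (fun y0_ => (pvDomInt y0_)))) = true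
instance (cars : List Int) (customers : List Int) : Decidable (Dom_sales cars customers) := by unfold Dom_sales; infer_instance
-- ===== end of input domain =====

-- B replaces A's hand-written quicksort and per-customer linear scan by list.sort + a bisect_right
-- binary search; both A and B mutate `cars` identically (sort, then remove each sold car) — the
-- equivalence proved here is about the return value.

-- ===== PORT A =====

-- Python `arr[a], arr[b] = arr[b], arr[a]` (both reads happen before the writes)
def pvSwap (arr : List Int) (a b : Int) : List Int :=
  PySem.List.pySetD (PySem.List.pySetD arr a (PySem.List.pyGetD arr b 0)) b (PySem.List.pyGetD arr a 0)

-- the `for j in range(low, high)` loop of `partition`, state = (arr, i);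
-- fuel = number of remaining iterations (high - j), a pure totality guard
def partLoop : Nat → List Int → Int → Int → Int → Int → List Int × Int
  | 0, arr, _, i, _, _ => (arr, i)
  | fuel + 1, arr, pivot, i, j, high =>
    if j < high then
      if PySem.List.pyGetD arr j 0 < pivot then
        partLoop fuel (pvSwap arr (i + 1) j) pivot (i + 1) (j + 1) high
      else
        partLoop fuel arr pivot i (j + 1) high
    else (arr, i)

def partitionL (arr : List Int) (low high : Int) : List Int × Int :=
  let pivot := PySem.List.pyGetD arr high 0
  let p := partLoop (high - low).toNat arr pivot (low - 1) low high
  (pvSwap p.1 (p.2 + 1) high, p.2 + 1)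

-- recursive quickSort; fuel (> high - low at every reachable call) is a pure totality guard
def quickSortF : Nat → List Int → Int → Int → List Int
  | 0, arr, _, _ => arr
  | fuel + 1, arr, low, high =>
    if low < high then
      let p := partitionL arr low high
      quickSortF fuel (quickSortF fuel p.1 low (p.2 - 1)) (p.2 + 1) high
    else arr

-- the inner `for i in range(len(cars)) … break` scan; `current` starts as None
-- fuel = number of remaining indices (cars.length - i), a pure totality guard
def innerScan (cars : List Int) (b : Int) : Nat → Nat → Option Nat → Option Nat
  | 0, _, current => current
  | fuel + 1, i, current =>
    if h : i < cars.length then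
      if cars[i] > b then current
      else innerScan cars b fuel (i + 1) (some i)
    else current

-- the `for budjet in customers` loop, state = (cars, numberOfSales)
def salesLoopA (cars : List Int) (customers : List Int) (n : Int) : Int :=
  match customers with
  | [] => n
  | b :: rest =>
    match innerScan cars b cars.length 0 none with
    | none => salesLoopA cars rest n
    | some cur =>
      match PySem.List.pop? cars (cur : Int) with
      | some pr => salesLoopA pr.2 rest (n + 1)
      | none => salesLoopA cars rest n   -- unreachable: cur is a valid index

def sales (cars : List Int) (customers : List Int) : Int :=
  salesLoopA (quickSortF cars.length cars 0 ((cars.length : Int) - 1)) customers 0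

-- ===== PORT B =====

def salesLoopB (stock : List Int) (customers : List Int) (n : Int) : Int :=
  match customers with
  | [] => n
  | b :: rest =>
    let i := PySem.List.bisectRight stock b
    if i ≠ 0 then
      match PySem.List.pop? stock ((i : Int) - 1) with
      | some pr => salesLoopB pr.2 rest (n + 1)
      | none => salesLoopB stock rest n   -- unreachable: i - 1 is a valid index
    else salesLoopB stock rest n

def sales_alt (cars : List Int) (customers : List Int) : Int :=
  salesLoopB (PySem.List.sorted cars (fun x => x) false) customers 0

-- ===== PRECONDITION & SPEC =====
def Spec_sales (cars : List Int) (customers : List Int) (out : Int) : Prop := out = sales_alt cars customers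
instance (cars : List Int) (customers : List Int) (out : Int) : Decidable (Spec_sales cars customers out) := by unfold Spec_sales; infer_instance

-- ===== CLAIM (what is proved, stated in full; the proofs are below) =====
def Claim_equal_sales : Prop := ∀ (cars : List Int) (customers : List Int), Dom_sales cars customers → Spec_sales cars customers (sales cars customers)

-- ===== LEMMAS AND PROOFS =====

-- ---- swap helpers ----

theorem length_pvSwap (arr : List Int) (a b : Int) :
    (pvSwap arr a b).length = arr.length := by
  simp [pvSwap, PySem.List.length_pySetD]

theorem pvSwap_getD (arr : List Int) (a b : Int) (k : Nat)
    (ha0 : 0 ≤ a) (ha : a < (arr.length : Int)) (hb0 : 0 ≤ b) (hb : b < (arr.length : Int))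
    (hk : k < arr.length) :
    (pvSwap arr a b).getD k 0 =
      if (k : Int) = b then arr.getD a.toNat 0
      else if (k : Int) = a then arr.getD b.toNat 0
      else arr.getD k 0 := by
  have ha' : a.toNat < arr.length := by omega
  have hb' : b.toNat < arr.length := by omega
  unfold pvSwap
  rw [PySem.List.pySetD_of_nonneg _ _ ha0, PySem.List.pySetD_of_nonneg _ _ hb0]
  have hk1 : k < ((arr.set a.toNat (PySem.List.pyGetD arr b 0)).set b.toNat (PySem.List.pyGetD arr a 0)).length := by
    simp; omega
  rw [List.getD_eq_getElem _ _ hk1]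
  simp only [List.getElem_set,
    PySem.List.pyGetD_eq_getElem arr 0 ha0 ha, PySem.List.pyGetD_eq_getElem arr 0 hb0 hb]
  rw [List.getD_eq_getElem _ _ ha', List.getD_eq_getElem _ _ hb', List.getD_eq_getElem _ _ hk]
  split_ifs <;> first | rfl | omega

theorem pvSwap_perm (arr : List Int) (a b : Int)
    (ha0 : 0 ≤ a) (ha : a < (arr.length : Int)) (hb0 : 0 ≤ b) (hb : b < (arr.length : Int)) :
    (pvSwap arr a b).Perm arr := by
  have ha' : a.toNat < arr.length := by omega
  have hb' : b.toNat < arr.length := by omega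
  unfold pvSwap
  rw [PySem.List.pySetD_of_nonneg _ _ ha0, PySem.List.pySetD_of_nonneg _ _ hb0]
  rw [PySem.List.pyGetD_eq_getElem arr 0 ha0 ha, PySem.List.pyGetD_eq_getElem arr 0 hb0 hb]
  exact List.set_set_perm ha' hb'

-- ---- segment helpers ----

def seg (l : List Int) (a b : Nat) : List Int := (l.drop a).take (b - a)

theorem seg_decomp (l : List Int) (a b : Nat) (hab : a ≤ b) (hb : b ≤ l.length) :
    l = l.take a ++ seg l a b ++ l.drop b := by
  conv_lhs => rw [← List.take_append_drop a l]
  rw [List.append_assoc]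
  congr 1
  conv_lhs => rw [← List.take_append_drop (b - a) (l.drop a)]
  unfold seg
  congr 1
  rw [List.drop_drop]
  congr 1
  omega

theorem mem_seg (l : List Int) (a b : Nat) (hb : b ≤ l.length) (x : Int) :
    x ∈ seg l a b ↔ ∃ k, a ≤ k ∧ k < b ∧ l.getD k 0 = x := by
  unfold seg
  rw [List.mem_iff_getElem]
  constructor
  · rintro ⟨i, h, rfl⟩
    have h' : i < b - a ∧ i < l.length - a := by
      simpa [List.length_take, List.length_drop] using h
    refine ⟨a + i, by omega, by omega, ?_⟩
    rw [List.getD_eq_getElem _ _ (by omega : a + i < l.length), List.getElem_take, List.getElem_drop]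
  · rintro ⟨k, hak, hkb, rfl⟩
    have hkl : k < l.length := by omega
    have hlen : k - a < ((l.drop a).take (b - a)).length := by
      simp [List.length_take, List.length_drop]; omega
    refine ⟨k - a, hlen, ?_⟩
    rw [List.getElem_take, List.getElem_drop, List.getD_eq_getElem _ _ hkl]
    congr 1
    omega

theorem seg_perm_of_perm_of_eq_outside (l1 l2 : List Int) (a b : Nat)
    (hlen : l1.length = l2.length) (hab : a ≤ b) (hb : b ≤ l1.length)
    (hp : l1.Perm l2)
    (hout : ∀ k, k < l1.length → (k < a ∨ b ≤ k) → l1.getD k 0 = l2.getD k 0) :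
    (seg l1 a b).Perm (seg l2 a b) := by
  have htake : l1.take a = l2.take a := by
    apply List.ext_getElem (by simp [hlen])
    intro i h1 h2
    have h' : i < a ∧ i < l1.length := by simpa using h1
    have hil : i < l1.length := h'.2
    rw [List.getElem_take, List.getElem_take]
    have := hout i hil (Or.inl h'.1)
    rwa [List.getD_eq_getElem _ _ hil, List.getD_eq_getElem _ _ (by omega)] at this
  have hdrop : l1.drop b = l2.drop b := by
    apply List.ext_getElem (by simp [hlen])
    intro i h1 h2
    have h' : i < l1.length - b := by simpa using h1
    have hil : b + i < l1.length := by omega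
    rw [List.getElem_drop, List.getElem_drop]
    have := hout (b + i) hil (Or.inr (by omega))
    rwa [List.getD_eq_getElem _ _ hil, List.getD_eq_getElem _ _ (by omega)] at this
  have h1 := seg_decomp l1 a b hab hb
  have h2 := seg_decomp l2 a b hab (by omega)
  rw [h1, h2, htake, hdrop] at hp
  rw [List.append_assoc, List.append_assoc] at hp
  rw [List.perm_append_left_iff] at hp
  rwa [List.perm_append_right_iff] at hp

-- the Lomuto partition loop invariant
theorem partLoop_spec (pivot low high : Int) (hlow : 0 ≤ low) :
    ∀ (n : Nat) (arr : List Int) (i j : Int),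
      (high - j).toNat = n →
      low ≤ j → j ≤ high → low - 1 ≤ i → i < j → high < (arr.length : Int) →
      (∀ k : Nat, k < arr.length → low ≤ (k : Int) → (k : Int) ≤ i → arr.getD k 0 < pivot) →
      (∀ k : Nat, k < arr.length → i < (k : Int) → (k : Int) < j → pivot ≤ arr.getD k 0) →
      (partLoop n arr pivot i j high).1.length = arr.length ∧
      low - 1 ≤ (partLoop n arr pivot i j high).2 ∧
      (partLoop n arr pivot i j high).2 < high ∧
      (partLoop n arr pivot i j high).1.Perm arr ∧
      (∀ k : Nat, k < arr.length → ((k : Int) < low ∨ high ≤ (k : Int)) →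
        (partLoop n arr pivot i j high).1.getD k 0 = arr.getD k 0) ∧
      (∀ k : Nat, k < arr.length → low ≤ (k : Int) → (k : Int) ≤ (partLoop n arr pivot i j high).2 →
        (partLoop n arr pivot i j high).1.getD k 0 < pivot) ∧
      (∀ k : Nat, k < arr.length → (partLoop n arr pivot i j high).2 < (k : Int) → (k : Int) < high →
        pivot ≤ (partLoop n arr pivot i j high).1.getD k 0) := by
  intro n
  induction n with
  | zero =>
    intro arr i j hn hlj hjh hli hij hhl hA hB
    exact ⟨rfl, by show low - 1 ≤ i; omega, by show i < high; omega, List.Perm.refl arr,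
      fun k _ _ => rfl, fun k hk h1 h2 => hA k hk h1 h2,
      fun k hk h1 h2 => hB k hk h1 (by revert h1 h2; show i < (k : Int) → (k : Int) < high → _; omega)⟩
  | succ m ih =>
    intro arr i j hn hlj hjh hli hij hhl hA hB
    have hjh' : j < high := by omega
    have hj0 : 0 ≤ j := by omega
    have hjl : j < (arr.length : Int) := by omega
    have hpg : PySem.List.pyGetD arr j 0 = arr.getD j.toNat 0 := by
      rw [PySem.List.pyGetD_eq_getElem arr 0 hj0 hjl, List.getD_eq_getElem _ _ (by omega)]
    simp only [partLoop, if_pos hjh']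
    by_cases hlt : PySem.List.pyGetD arr j 0 < pivot
    · simp only [if_pos hlt]
      have hi10 : 0 ≤ i + 1 := by omega
      have hi1l : i + 1 < (arr.length : Int) := by omega
      have hswlen : (pvSwap arr (i + 1) j).length = arr.length := length_pvSwap arr (i + 1) j
      have hget : ∀ k : Nat, k < arr.length →
          (pvSwap arr (i + 1) j).getD k 0 =
            if (k : Int) = j then arr.getD (i + 1).toNat 0
            else if (k : Int) = i + 1 then arr.getD j.toNat 0
            else arr.getD k 0 := fun k hk => pvSwap_getD arr (i + 1) j k hi10 hi1l hj0 hjl hk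
      obtain ⟨c1, c2, c3, c4, c5, c6, c7⟩ := ih (pvSwap arr (i + 1) j) (i + 1) (j + 1)
        (by omega) (by omega) (by omega) (by omega) (by omega) (by omega)
        (by -- A invariant after the swap
          intro k hk h1 h2
          rw [hswlen] at hk
          rw [hget k hk]
          split_ifs with g1 g2
          · -- k = j; only possible if i + 1 = j
            have hij' : i + 1 = j := by omega
            have : (i + 1).toNat = j.toNat := by omega
            rw [this, ← hpg]; exact hlt
          · rw [← hpg]; exact hlt
          · exact hA k hk h1 (by omega))
        (by -- B invariant after the swap
          intro k hk h1 h2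
          rw [hswlen] at hk
          rw [hget k hk]
          split_ifs with g1 g2
          · -- k = j, and i + 1 < j since the interval (i+1, j+1) ∋ k
            have : i + 1 < j := by omega
            have hkk : k = j.toNat := by omega
            have h5 : i < i + 1 := by omega
            have := hB (i + 1).toNat (by omega) (by omega) (by omega)
            have he : ((i + 1).toNat : Int) = i + 1 := by omega
            exact this
          · omega
          · exact hB k hk (by omega) (by omega))
      rw [hswlen] at c1
      refine ⟨c1, c2, c3, c4.trans (pvSwap_perm arr (i + 1) j hi10 hi1l hj0 hjl), ?_, ?_, ?_⟩
      · intro k hk hout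
        rw [c5 k (by omega) hout, hget k hk]
        rw [if_neg (by omega), if_neg (by omega)]
      · intro k hk h1 h2
        exact c6 k (by omega) h1 h2
      · intro k hk h1 h2
        exact c7 k (by omega) h1 h2
    · simp only [if_neg hlt]
      obtain ⟨c1, c2, c3, c4, c5, c6, c7⟩ := ih arr i (j + 1)
        (by omega) (by omega) (by omega) (by omega) (by omega) (by omega)
        hA
        (by intro k hk h1 h2
            by_cases hkj : (k : Int) = j
            · have hkk : k = j.toNat := by omega
              rw [hkk, ← hpg]
              omega
            · exact hB k hk h1 (by omega))
      exact ⟨c1, c2, c3, c4, c5, c6, c7⟩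

-- what `partition` guarantees: pivot value at the returned index, smaller left, not-smaller right
theorem partition_spec (arr : List Int) (low high : Int)
    (h0 : 0 ≤ low) (hlh : low < high) (hh : high < (arr.length : Int)) :
    (partitionL arr low high).1.length = arr.length ∧
    low ≤ (partitionL arr low high).2 ∧ (partitionL arr low high).2 ≤ high ∧
    (partitionL arr low high).1.Perm arr ∧
    (∀ k : Nat, k < arr.length → ((k : Int) < low ∨ high < (k : Int)) →
      (partitionL arr low high).1.getD k 0 = arr.getD k 0) ∧
    (∀ k : Nat, k < arr.length → low ≤ (k : Int) → (k : Int) < (partitionL arr low high).2 →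
      (partitionL arr low high).1.getD k 0 <
        (partitionL arr low high).1.getD (partitionL arr low high).2.toNat 0) ∧
    (∀ k : Nat, k < arr.length → (partitionL arr low high).2 < (k : Int) → (k : Int) ≤ high →
      (partitionL arr low high).1.getD (partitionL arr low high).2.toNat 0 ≤
        (partitionL arr low high).1.getD k 0) := by
  obtain ⟨c1, c2, c3, c4, c5, c6, c7⟩ :=
    partLoop_spec (PySem.List.pyGetD arr high 0) low high h0 (high - low).toNat arr (low - 1) low
      rfl (le_refl low) (by omega) (by omega) (by omega) hh
      (by intro k _ h1 h2; omega)
      (by intro k _ h1 h2; omega)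
  set pivot := PySem.List.pyGetD arr high 0 with hpivdef
  set P := partLoop (high - low).toNat arr pivot (low - 1) low high with hPdef
  have hpg : pivot = arr.getD high.toNat 0 := by
    rw [hpivdef, PySem.List.pyGetD_eq_getElem arr 0 (by omega) hh,
      List.getD_eq_getElem _ _ (by omega)]
  have hpiv : P.1.getD high.toNat 0 = pivot := by
    rw [c5 high.toNat (by omega) (Or.inr (by omega)), hpg]
  have hres : partitionL arr low high = (pvSwap P.1 (P.2 + 1) high, P.2 + 1) := by
    simp only [partitionL, ← hpivdef, ← hPdef]
  rw [hres]
  have hp0 : (0 : Int) ≤ P.2 + 1 := by omega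
  have hpl : P.2 + 1 < (P.1.length : Int) := by rw [c1]; omega
  have hh0 : (0 : Int) ≤ high := by omega
  have hhl' : high < (P.1.length : Int) := by rw [c1]; omega
  have hget : ∀ k : Nat, k < arr.length →
      (pvSwap P.1 (P.2 + 1) high).getD k 0 =
        if (k : Int) = high then P.1.getD (P.2 + 1).toNat 0
        else if (k : Int) = P.2 + 1 then P.1.getD high.toNat 0
        else P.1.getD k 0 :=
    fun k hk => pvSwap_getD P.1 (P.2 + 1) high k hp0 hpl hh0 hhl' (by omega)
  -- value at the returned index is the pivot
  have hatpi : (pvSwap P.1 (P.2 + 1) high).getD (P.2 + 1).toNat 0 = pivot := by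
    rw [hget (P.2 + 1).toNat (by omega)]
    by_cases hph : P.2 + 1 = high
    · rw [if_pos (by omega)]
      have : (P.2 + 1).toNat = high.toNat := by omega
      rw [this, hpiv]
    · rw [if_neg (by omega), if_pos (by omega), hpiv]
  constructor
  · rw [length_pvSwap, c1]
  refine ⟨by omega, by omega, ?_, ?_, ?_, ?_⟩
  · exact (pvSwap_perm P.1 (P.2 + 1) high hp0 hpl hh0 hhl').trans c4
  · intro k hk hout
    rw [hget k hk, if_neg (by omega), if_neg (by omega)]
    exact c5 k hk (by omega)
  · intro k hk h1 h2
    rw [hatpi, hget k hk, if_neg (by omega), if_neg (by omega)]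
    exact c6 k hk h1 (by omega)
  · intro k hk h1 h2
    rw [hatpi, hget k hk]
    by_cases hkh : (k : Int) = high
    · rw [if_pos hkh]
      have : P.2 + 1 < high := by omega
      have := c7 (P.2 + 1).toNat (by omega) (by omega) (by omega)
      exact this
    · rw [if_neg hkh, if_neg (by omega)]
      exact c7 k hk (by omega) (by omega)

-- quickSort sorts the segment [low, high] and leaves everything else in place
theorem quickSort_spec :
    ∀ (fuel : Nat) (arr : List Int) (low high : Int), (high - low).toNat < fuel →
      0 ≤ low → high < (arr.length : Int) →
      (quickSortF fuel arr low high).length = arr.length ∧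
      (quickSortF fuel arr low high).Perm arr ∧
      (∀ k : Nat, k < arr.length → ((k : Int) < low ∨ high < (k : Int)) →
        (quickSortF fuel arr low high).getD k 0 = arr.getD k 0) ∧
      (∀ k1 k2 : Nat, low ≤ (k1 : Int) → k1 ≤ k2 → (k2 : Int) ≤ high → k2 < arr.length →
        (quickSortF fuel arr low high).getD k1 0 ≤ (quickSortF fuel arr low high).getD k2 0) := by
  intro fuel
  induction fuel with
  | zero => intro arr low high hn; omega
  | succ f ih =>
    intro arr low high hn h0 hh
    by_cases hlh : low < high
    · simp only [quickSortF, if_pos hlh]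
      obtain ⟨p1, p2, p3, p4, p5, p6, p7⟩ := partition_spec arr low high h0 hlh hh
      set A1 := (partitionL arr low high).1 with hA1
      set pi := (partitionL arr low high).2 with hpi
      have hL : A1.length = arr.length := p1
      obtain ⟨q1, q2, q3, q4⟩ := ih A1 low (pi - 1) (by omega) h0
        (by rw [hL]; omega)
      set A2 := quickSortF f A1 low (pi - 1) with hA2
      have hL2 : A2.length = arr.length := by rw [q1, hL]
      obtain ⟨r1, r2, r3, r4⟩ := ih A2 (pi + 1) high (by omega)
        (by omega) (by rw [hL2]; omega)
      set A3 := quickSortF f A2 (pi + 1) high with hA3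
      have hL3 : A3.length = arr.length := by rw [r1, hL2]
      -- the pivot value survives both recursive calls
      set vpi := A1.getD pi.toNat 0 with hvpi
      have hpi2 : A2.getD pi.toNat 0 = vpi := q3 pi.toNat (by omega) (Or.inr (by omega))
      have hpi3 : A3.getD pi.toNat 0 = vpi := by
        rw [r3 pi.toNat (by omega) (Or.inl (by omega)), hpi2]
      -- A3 agrees with A2 on [low, pi-1] and with A1 on [pi+1, high]
      have h32 : ∀ k : Nat, k < arr.length → (k : Int) < pi + 1 → A3.getD k 0 = A2.getD k 0 :=
        fun k hk h => r3 k (by omega) (Or.inl h)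
      have h21 : ∀ k : Nat, k < arr.length → ((k : Int) < low ∨ pi - 1 < (k : Int)) →
          A2.getD k 0 = A1.getD k 0 := fun k hk h => q3 k (by omega) h
      -- every A3-value on [low, pi) is < vpi
      have hleft : ∀ k : Nat, k < arr.length → low ≤ (k : Int) → (k : Int) < pi →
          A3.getD k 0 < vpi := by
        intro k hk hk1 hk2
        rw [h32 k hk (by omega)]
        have hsp : (seg A2 low.toNat pi.toNat).Perm (seg A1 low.toNat pi.toNat) := by
          refine seg_perm_of_perm_of_eq_outside A2 A1 low.toNat pi.toNat (by omega) (by omega)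
            (by omega) q2 ?_
          intro k' hk' hout
          exact h21 k' (by omega) (by omega)
        have hmem : A2.getD k 0 ∈ seg A2 low.toNat pi.toNat :=
          (mem_seg A2 low.toNat pi.toNat (by omega) _).mpr ⟨k, by omega, by omega, rfl⟩
        have := hsp.mem_iff.mp hmem
        obtain ⟨k', hk'1, hk'2, hk'3⟩ := (mem_seg A1 low.toNat pi.toNat (by omega) _).mp this
        rw [← hk'3]
        exact p6 k' (by omega) (by omega) (by omega)
      -- every A3-value on (pi, high] is ≥ vpi
      have hright : ∀ k : Nat, k < arr.length → pi < (k : Int) → (k : Int) ≤ high →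
          vpi ≤ A3.getD k 0 := by
        intro k hk hk1 hk2
        have hsp : (seg A3 (pi.toNat + 1) (high.toNat + 1)).Perm
            (seg A2 (pi.toNat + 1) (high.toNat + 1)) := by
          refine seg_perm_of_perm_of_eq_outside A3 A2 (pi.toNat + 1) (high.toNat + 1)
            (by omega) (by omega) (by omega) r2 ?_
          intro k' hk' hout
          exact r3 k' (by omega) (by omega)
        have hmem : A3.getD k 0 ∈ seg A3 (pi.toNat + 1) (high.toNat + 1) :=
          (mem_seg A3 (pi.toNat + 1) (high.toNat + 1) (by omega) _).mpr ⟨k, by omega, by omega, rfl⟩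
        have := hsp.mem_iff.mp hmem
        obtain ⟨k', hk'1, hk'2, hk'3⟩ :=
          (mem_seg A2 (pi.toNat + 1) (high.toNat + 1) (by omega) _).mp this
        rw [← hk'3, h21 k' (by omega) (by omega)]
        exact p7 k' (by omega) (by omega) (by omega)
      refine ⟨hL3, r2.trans (q2.trans p4), ?_, ?_⟩
      · intro k hk hout
        rw [r3 k (by omega) (by omega), h21 k hk (by omega), p5 k hk hout]
      · intro k1 k2 hk1 h12 hk2 hk2len
        have hk1len : k1 < arr.length := by omega
        by_cases c1 : (k2 : Int) < pi
        · rw [h32 k1 hk1len (by omega), h32 k2 hk2len (by omega)]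
          exact q4 k1 k2 hk1 h12 (by omega) (by omega)
        · by_cases c2 : (k2 : Int) = pi
          · by_cases c3 : (k1 : Int) = pi
            · have : k1 = k2 := by omega
              subst this
              exact le_refl _
            · have hk2pi : k2 = pi.toNat := by omega
              rw [hk2pi, hpi3]
              exact (hleft k1 hk1len hk1 (by omega)).le
          · by_cases c3 : pi < (k1 : Int)
            · exact r4 k1 k2 (by omega) h12 hk2 (by omega)
            · by_cases c4 : (k1 : Int) = pi
              · have hk1pi : k1 = pi.toNat := by omega
                rw [hk1pi, hpi3]
                exact hright k2 hk2len (by omega) hk2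
              · exact ((hleft k1 hk1len hk1 (by omega)).trans_le
                  (hright k2 hk2len (by omega) hk2)).le
    · simp only [quickSortF, if_neg hlh]
      refine ⟨trivial, List.Perm.refl arr, fun k _ _ => trivial, ?_⟩
      intro k1 k2 hk1 h12 hk2 hk2len
      have : k1 = k2 := by omega
      subst this
      exact le_refl _

theorem quickSortF_eq_sorted (cars : List Int) :
    quickSortF cars.length cars 0 ((cars.length : Int) - 1)
      = PySem.List.sorted cars (fun x => x) false := by
  by_cases hnil : cars = []
  · subst hnil; rfl
  · have hpos : 0 < cars.length := List.length_pos_iff.mpr hnil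
    obtain ⟨l1, l2, l3, l4⟩ := quickSort_spec cars.length cars 0
      ((cars.length : Int) - 1) (by omega) (le_refl 0) (by omega)
    refine (PySem.List.sorted_id_eq_of_perm_of_pairwise cars _ l2 ?_).symm
    rw [List.pairwise_iff_getElem]
    intro i j hi hj hij
    have hjc : j < cars.length := by omega
    have := l4 i j (by omega) (by omega) (by omega) hjc
    rwa [List.getD_eq_getElem _ _ hi, List.getD_eq_getElem _ _ hj] at this

-- once past the last element ≤ b, the scan just returns its accumulator
theorem innerScan_stop (stock : List Int) (b : Int) (hs : stock.Pairwise (· ≤ ·)) :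
    ∀ (fuel i : Nat) (cur : Option Nat), PySem.List.bisectRight stock b ≤ i →
      innerScan stock b fuel i cur = cur := by
  intro fuel
  cases fuel with
  | zero => intro i cur _; rfl
  | succ m =>
    intro i cur hci
    obtain ⟨hle, h1, h2⟩ := PySem.List.bisectRight_spec stock b hs
    simp only [innerScan]
    by_cases h : i < stock.length
    · simp only [dif_pos h]
      rw [if_pos (h2 i h hci)]
    · simp only [dif_neg h]

-- while elements are still ≤ b the scan advances, ending at bisectRight - 1
theorem innerScan_run (stock : List Int) (b : Int) (hs : stock.Pairwise (· ≤ ·)) :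
    ∀ (fuel i : Nat) (cur : Option Nat), fuel = stock.length - i →
      i < PySem.List.bisectRight stock b →
      innerScan stock b fuel i cur = some (PySem.List.bisectRight stock b - 1) := by
  obtain ⟨hle, h1, h2⟩ := PySem.List.bisectRight_spec stock b hs
  intro fuel
  induction fuel with
  | zero => intro i cur hd hi; omega
  | succ m ih =>
    intro i cur hd hi
    have hilen : i < stock.length := by omega
    simp only [innerScan, dif_pos hilen]
    rw [if_neg (not_lt.mpr (h1 i hilen hi))]
    by_cases hc : i + 1 < PySem.List.bisectRight stock b
    · exact ih (i + 1) (some i) (by omega) hc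
    · have : PySem.List.bisectRight stock b = i + 1 := by omega
      rw [innerScan_stop stock b hs m (i + 1) (some i) (by omega), this]
      norm_num

theorem salesLoop_eq (customers : List Int) :
    ∀ (stock : List Int) (n : Int), stock.Pairwise (· ≤ ·) →
      salesLoopA stock customers n = salesLoopB stock customers n := by
  induction customers with
  | nil => intro stock n _; rfl
  | cons b rest ih =>
    intro stock n hs
    obtain ⟨hle, h1, h2⟩ := PySem.List.bisectRight_spec stock b hs
    rw [salesLoopA, salesLoopB]
    by_cases hc : PySem.List.bisectRight stock b = 0
    · rw [innerScan_stop stock b hs stock.length 0 none (by omega)]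
      simp only [hc, ne_eq, not_true_eq_false, if_false]
      exact ih stock n hs
    · rw [innerScan_run stock b hs stock.length 0 none (by omega) (by omega)]
      have hlt : PySem.List.bisectRight stock b - 1 < stock.length := by omega
      have hcast : ((PySem.List.bisectRight stock b : Int) - 1)
          = ((PySem.List.bisectRight stock b - 1 : Nat) : Int) := by omega
      rw [if_pos hc]
      simp only [hcast, PySem.List.pop?_natCast stock _ hlt]
      exact ih (stock.eraseIdx (PySem.List.bisectRight stock b - 1)) (n + 1)
        (List.Pairwise.sublist (List.eraseIdx_sublist stock _) hs)

-- ===== VERDICT (by name: the statement is the Claim_ definition above) =====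
theorem sales_spec : Claim_equal_sales := by
  intro cars customers _
  unfold Spec_sales sales sales_alt
  rw [quickSortF_eq_sorted]
  exact salesLoop_eq customers _ 0 (PySem.List.sorted_pairwise cars (fun x => x))
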